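-- pv_equiv track=rewrite | github.com/bozhedon/Homework | hw2/hw3.py | count_unique_codes
-- ===== SOURCE A (Python) =====
-- def count_unique_codes(words):
--     morse_base = [
--         ".-", "-...", "-.-.", "-..", ".", "..-.", "--.", "....", "..", ".---",
--         "-.-", ".-..", "--", "-.", "---", ".--.", "--.-", ".-.", "...", "-",
--         "..-", "...-", ".--", "-..-", "-.--", "--.."
--     ]
--     alphabet = [chr(l) for l in range(ord('a'), ord('z') + 1)]
--     alphabet_dict = {}
--     for l, m in zip(alphabet, morse_base):
--         alphabet_dict[l] = m
--
--     # 1st method using built-in functions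
--     # return len({w.translate(str.maketrans(alphabet_dict)) for w in words})
--
--     # 2nd method
--     # new_words = set()
--     # for w in words:
--     #     morse_word = ''
--     #     for i in range(len(w)):
--     #         morse_word = morse_word + alphabet_dict[w[i]]
--     #     new_words.add(morse_word)
--     # return len(new_words)
--
--     # 3rd method
--     new_words = set()
--     for w in words:
--         morse_word = w
--         for l in set(w):
--             morse_word = morse_word.replace(l, alphabet_dict[l])
--         new_words.add(morse_word)
--     return len(new_words)
-- ===== SOURCE B (Python) =====
-- def count_unique_codes(words):
--     morse_base = [
--         ".-", "-...", "-.-.", "-..", ".", "..-.", "--.", "....", "..", ".---",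
--         "-.-", ".-..", "--", "-.", "---", ".--.", "--.-", ".-.", "...", "-",
--         "..-", "...-", ".--", "-..-", "-.--", "--.."
--     ]
--     alphabet_dict = {chr(ord('a') + i): m for i, m in enumerate(morse_base)}
--     return len({''.join(alphabet_dict[c] for c in w) for w in words})
-- ===== Notes on version B (the rewrite author's own statement) =====
-- stated objective: simpler
-- what changed: Per word, B builds the Morse string in one left-to-right pass joining alphabet_dict[c] for each character, instead of A's per-unique-letter str.replace rescans of the whole word; the word set becomes a single set comprehension.
import Mathlib
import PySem

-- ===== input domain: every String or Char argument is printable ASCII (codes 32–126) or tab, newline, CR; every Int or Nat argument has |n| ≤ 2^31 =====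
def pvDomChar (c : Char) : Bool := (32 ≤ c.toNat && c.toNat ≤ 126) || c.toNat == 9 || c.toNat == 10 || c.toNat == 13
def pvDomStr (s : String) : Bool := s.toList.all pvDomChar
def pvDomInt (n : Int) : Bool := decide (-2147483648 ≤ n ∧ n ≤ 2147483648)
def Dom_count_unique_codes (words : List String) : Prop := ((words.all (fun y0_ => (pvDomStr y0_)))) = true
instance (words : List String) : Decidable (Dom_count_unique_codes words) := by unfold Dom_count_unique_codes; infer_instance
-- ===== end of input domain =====

-- B replaces A's per-unique-letter str.replace rescans by one left-to-right join of
-- per-character lookups (objective: simpler single-pass translation, same result).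

-- ===== PORT A =====
def morseBase : List String := [
    ".-", "-...", "-.-.", "-..", ".", "..-.", "--.", "....", "..", ".---",
    "-.-", ".-..", "--", "-.", "---", ".--.", "--.-", ".-.", "...", "-",
    "..-", "...-", ".--", "-..-", "-.--", "--.."]

-- port of A; alphabet_dict[l] (KeyError on a char outside 'a'..'z') is totalised with
-- getD, exact under Pre_; the iteration over set(w) is order-insensitive under Pre_
-- (the replacement strings contain no lowercase letters).
def count_unique_codes (words : List String) : Int :=
  let alphabet : List Char := (PySem.List.pyRange 97 123 1).map (fun l => Char.ofNat l.toNat)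
  let alphabet_dict : PySem.Dict Char String :=
    (alphabet.zip morseBase).foldl (fun d p => d.insert p.1 p.2) (PySem.Dict.empty : PySem.Dict Char String)
  let new_words : PySem.Set String :=
    words.foldl (fun s w =>
      let morse := (PySem.Set.ofList w.toList).foldl
        (fun m l => PySem.Str.replace m (String.ofList [l]) (alphabet_dict.getD l "")) w
      PySem.Set.add s morse) PySem.Set.empty
  PySem.Set.len new_words

-- ===== PORT B =====
def count_unique_codes_alt (words : List String) : Int :=
  let alphabet_dict : PySem.Dict Char String :=
    (PySem.List.enumerate morseBase 0).foldl
      (fun d p => d.insert (Char.ofNat (97 + p.1).toNat) p.2) (PySem.Dict.empty : PySem.Dict Char String)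
  PySem.Set.len (PySem.Set.ofList (words.map (fun w =>
    PySem.Str.join "" (w.toList.map (fun c => alphabet_dict.getD c "")))))

-- ===== PRECONDITION & SPEC =====
-- Pre_ excludes exactly the inputs on which A raises KeyError: a word containing a
-- character outside 'a'..'z' (uppercase, digit, punctuation, whitespace).
def Pre_count_unique_codes (words : List String) : Prop :=
  (words.all (fun w => w.toList.all (fun c => decide ('a' ≤ c) && decide (c ≤ 'z')))) = true
instance (words : List String) : Decidable (Pre_count_unique_codes words) := by
  unfold Pre_count_unique_codes; infer_instance

def pvWitness_count_unique_codes : List String := ["sos", "iji", "", "ab"]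

def Spec_count_unique_codes (words : List String) (out : Int) : Prop := out = count_unique_codes_alt words
instance (words : List String) (out : Int) : Decidable (Spec_count_unique_codes words out) := by unfold Spec_count_unique_codes; infer_instance

-- ===== CLAIM (what is proved, stated in full; the proofs are below) =====
def Claim_equal_count_unique_codes : Prop := ∀ (words : List String), Dom_count_unique_codes words → Pre_count_unique_codes words → Spec_count_unique_codes words (count_unique_codes words)

-- ===== LEMMAS AND PROOFS =====

def pvLetters : List Char :=
  ['a','b','c','d','e','f','g','h','i','j','k','l','m',
   'n','o','p','q','r','s','t','u','v','w','x','y','z']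

-- the (identical) dictionary both ports build, as a closed term
def pvDict : PySem.Dict Char String :=
  ((((PySem.List.pyRange 97 123 1).map (fun l => Char.ofNat l.toNat)).zip morseBase)).foldl
    (fun d p => d.insert p.1 p.2) (PySem.Dict.empty : PySem.Dict Char String)

def pvCode (c : Char) : List Char := (pvDict.getD c "").toList

lemma pvDict_alt_eq :
    (PySem.List.enumerate morseBase 0).foldl
      (fun d p => d.insert (Char.ofNat (97 + p.1).toNat) p.2) (PySem.Dict.empty : PySem.Dict Char String)
    = pvDict := by
  set_option maxRecDepth 100000 in rfl

lemma mem_letters_of_bounds (c : Char) (h1 : 'a' ≤ c) (h2 : c ≤ 'z') : c ∈ pvLetters := by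
  have hb1 : 97 ≤ c.toNat := h1
  have hb2 : c.toNat ≤ 122 := h2
  have e : c = Char.ofNat c.toNat := (Char.ofNat_toNat c).symm
  generalize hn : c.toNat = n at hb1 hb2 e
  rw [e]
  interval_cases n <;> decide

lemma pvDict_eq : pvDict = PySem.Dict.mk [('a', ".-"), ('b', "-..."), ('c', "-.-."), ('d', "-.."), ('e', "."), ('f', "..-."), ('g', "--."), ('h', "...."), ('i', ".."), ('j', ".---"), ('k', "-.-"), ('l', ".-.."), ('m', "--"), ('n', "-."), ('o', "---"), ('p', ".--."), ('q', "--.-"), ('r', ".-."), ('s', "..."), ('t', "-"), ('u', "..-"), ('v', "...-"), ('w', ".--"), ('x', "-..-"), ('y', "-.--"), ('z', "--..")] := by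
  set_option maxRecDepth 100000 in rfl

lemma codes_nonletter : ∀ l ∈ pvLetters, ∀ d ∈ pvCode l, d ∉ pvLetters := by
  intro l hl
  rw [pvCode.eq_def, pvDict_eq]
  fin_cases hl <;>
  · simp [PySem.Dict.getD, PySem.Dict.get?]
    decide

-- str.replace with a single-character pattern, characterised as a flatMap
lemma replace_go_single (l : Char) (new : List Char) :
    ∀ (s : List Char) (fuel : Nat) (acc : List Char), s.length ≤ fuel →
      PySem.Chars.replace.go [l] new fuel s acc
        = acc.reverse ++ s.flatMap (fun d => if d = l then new else [d]) := by
  intro s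
  induction s with
  | nil =>
    intro fuel acc _
    cases fuel <;> simp [PySem.Chars.replace.go]
  | cons c t ih =>
    intro fuel acc hle
    cases fuel with
    | zero => simp at hle
    | succ fuel =>
      by_cases hcl : l = c
      · subst hcl
        have : List.isPrefixOf [l] (l :: t) = true := by simp [List.isPrefixOf]
        simp only [PySem.Chars.replace.go, this, if_true, List.length_cons, List.length_nil,
          List.drop_succ_cons, List.drop_zero]
        rw [ih fuel (new.reverse ++ acc) (by simpa using Nat.le_of_succ_le_succ hle)]
        simp
      · have : List.isPrefixOf [l] (c :: t) = false := by
          simp [List.isPrefixOf, hcl]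
        simp only [PySem.Chars.replace.go, this, Bool.false_eq_true, if_false]
        rw [ih fuel (c :: acc) (by simpa using Nat.le_of_succ_le_succ hle)]
        simp [Ne.symm hcl]

lemma replace_single (s : List Char) (l : Char) (new : List Char) :
    PySem.Chars.replace s [l] new = s.flatMap (fun d => if d = l then new else [d]) := by
  rw [PySem.Chars.replace]
  simp only [List.isEmpty_cons, Bool.false_eq_true, if_false]
  simpa using replace_go_single l new s s.length [] (le_refl _)

lemma flatMap_congr_mem {α β : Type} (cs : List α) (f g : α → List β)
    (h : ∀ c ∈ cs, f c = g c) : cs.flatMap f = cs.flatMap g := by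
  induction cs with
  | nil => rfl
  | cons c t ih =>
    simp only [List.flatMap_cons, h c (List.mem_cons_self), ih (fun x hx => h x (List.mem_cons_of_mem _ hx))]

lemma flatMap_id_of_ne {β : Type} [DecidableEq β] (xs : List β) (l : β) (new : List β)
    (h : ∀ d ∈ xs, d ≠ l) :
    xs.flatMap (fun d => if d = l then new else [d]) = xs := by
  induction xs with
  | nil => rfl
  | cons d t ih =>
    simp only [List.flatMap_cons, if_neg (h d (List.mem_cons_self)),
      ih (fun x hx => h x (List.mem_cons_of_mem _ hx))]
    rfl

-- the loop invariant for A's per-word replace loop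
lemma fold_repl (ds : List Char) : ∀ (cs : List Char) (g : Char → List Char),
    ds.Nodup → (∀ l ∈ ds, l ∈ pvLetters) →
    (∀ c ∈ cs, c ∈ ds → g c = [c]) →
    (∀ c ∈ cs, c ∉ ds → ∀ d ∈ g c, d ∉ pvLetters) →
    ds.foldl (fun m l => PySem.Chars.replace m [l] (pvCode l)) (cs.flatMap g)
      = cs.flatMap (fun c => if c ∈ ds then pvCode c else g c) := by
  induction ds with
  | nil =>
    intro cs g _ _ _ _
    simp
  | cons l ds ih =>
    intro cs g hnd hlet hg1 hg2
    have hl : l ∈ pvLetters := hlet l (List.mem_cons_self)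
    have hstep : PySem.Chars.replace (cs.flatMap g) [l] (pvCode l)
        = cs.flatMap (fun c => if c = l then pvCode l else g c) := by
      rw [replace_single, List.flatMap_assoc]
      refine flatMap_congr_mem cs _ _ (fun c hc => ?_)
      by_cases hcds : c ∈ l :: ds
      · rw [hg1 c hc hcds]
        simp
      · have hne : c ≠ l := fun e => hcds (e ▸ List.mem_cons_self)
        rw [if_neg hne]
        exact flatMap_id_of_ne _ _ _
          (fun d hd e => (hg2 c hc hcds d hd) (e ▸ hl))
    have hlnd : l ∉ ds := (List.nodup_cons.mp hnd).1
    have := ih cs (fun c => if c = l then pvCode l else g c)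
      (List.nodup_cons.mp hnd).2
      (fun x hx => hlet x (List.mem_cons_of_mem _ hx))
      (fun c hc hcds => by
        have hne : c ≠ l := fun e => hlnd (e ▸ hcds)
        simp only [if_neg hne]
        exact hg1 c hc (List.mem_cons_of_mem _ hcds))
      (fun c hc hcds d hd => by
        by_cases hcl : c = l
        · simp only [if_pos hcl] at hd
          exact codes_nonletter l hl d hd
        · simp only [if_neg hcl] at hd
          exact hg2 c hc (by simp [hcl, hcds]) d hd)
    rw [List.foldl_cons, hstep, this]
    refine flatMap_congr_mem cs _ _ (fun c hc => ?_)
    by_cases hds : c ∈ ds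
    · simp [hds]
    · by_cases hcl : c = l
      · subst hcl; simp [hds]
      · simp [hds, hcl]

-- A's per-word String-level loop, moved to List Char
lemma strfold (ds : List Char) : ∀ (m : String),
    (ds.foldl (fun m l => PySem.Str.replace m (String.ofList [l]) (pvDict.getD l "")) m).toList
      = ds.foldl (fun mc l => PySem.Chars.replace mc [l] (pvCode l)) m.toList := by
  induction ds with
  | nil => intro m; rfl
  | cons l t ih =>
    intro m
    rw [List.foldl_cons, List.foldl_cons, ih, PySem.Str.toList_replace]
    simp [pvCode]

lemma join_nil_flatten : ∀ (xs : List (List Char)), PySem.Chars.join [] xs = xs.flatten := by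
  intro xs
  induction xs with
  | nil => simp [PySem.Chars.join_nil]
  | cons p rest ih =>
    cases rest with
    | nil => simp [PySem.Chars.join_singleton]
    | cons q r => rw [PySem.Chars.join_cons_cons, ih]; simp

-- per-word equality of the two translations
lemma word_eq (w : String) (h : ∀ c ∈ w.toList, 'a' ≤ c ∧ c ≤ 'z') :
    (PySem.Set.ofList w.toList).foldl
        (fun m l => PySem.Str.replace m (String.ofList [l]) (pvDict.getD l "")) w
      = PySem.Str.join "" (w.toList.map (fun c => pvDict.getD c "")) := by
  apply String.toList_inj.mp
  rw [strfold]
  have hjoin : (PySem.Str.join "" (w.toList.map (fun c => pvDict.getD c ""))).toList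
      = w.toList.flatMap pvCode := by
    rw [PySem.Str.toList_join]
    have : ("" : String).toList = [] := rfl
    rw [this, join_nil_flatten, List.map_map, ← List.flatMap_def]
    rfl
  rw [hjoin]
  have hcs : w.toList.flatMap (fun c => [c]) = w.toList := by simp
  have := fold_repl (PySem.Set.ofList w.toList) w.toList (fun c => [c])
    (PySem.Set.nodup_ofList _)
    (fun l hl => by
      have hlw : l ∈ w.toList := (PySem.Set.mem_ofList _ _).mp hl
      exact mem_letters_of_bounds l (h l hlw).1 (h l hlw).2)
    (fun c _ _ => rfl)
    (fun c _ hc => absurd ((PySem.Set.mem_ofList _ _).mpr ‹c ∈ w.toList›) hc)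
  rw [hcs] at this
  rw [this]
  refine flatMap_congr_mem _ _ _ (fun c hc => ?_)
  rw [if_pos ((PySem.Set.mem_ofList _ _).mpr hc)]

-- ===== VERDICT (by name: the statement is the Claim_ definition above) =====
theorem count_unique_codes_spec : Claim_equal_count_unique_codes := by
  intro words _ hpre
  rw [Pre_count_unique_codes, List.all_eq_true] at hpre
  simp only [Spec_count_unique_codes, count_unique_codes, count_unique_codes_alt]
  rw [pvDict_alt_eq]
  rw [PySem.Set.ofList_eq_foldl, List.foldl_map]
  congr 1
  refine PySem.List.foldl_congr_mem words _ _ _ (fun acc w hw => ?_)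
  show PySem.Set.add acc _ = PySem.Set.add acc _
  have hA : (List.foldl (fun d p => d.insert p.1 p.2) PySem.Dict.empty
      ((List.map (fun l => Char.ofNat l.toNat) (PySem.List.pyRange 97 123)).zip morseBase)) = pvDict := rfl
  have hw' : ∀ c ∈ w.toList, 'a' ≤ c ∧ c ≤ 'z' := by
    have := hpre w hw
    rw [List.all_eq_true] at this
    intro c hc
    simpa using this c hc
  rw [hA, word_eq w hw']
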